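-- pv_equiv track=rewrite | github.com/C-RH-C/crhc-cli | crhc_cli/report/report.py | check_for_system_purpose_role
-- ===== SOURCE A (Python) =====
-- def check_for_system_purpose_role(entries):
--     """
--     Function responsible for extract the system_purpose_role
--     """
--
--     # Checking for system_purpose_role
--     if len(entries["server"]["facts"]) == 0:
--         stage_lst = "No_facts_key_available"
--     elif len(entries["server"]["facts"]) > 0:
--         count = 0
--         for source in entries["server"]["facts"]:
--             try:
--                 if source["facts"]["SYSPURPOSE_ROLE"]:
--                     stage_lst = source["facts"]["SYSPURPOSE_ROLE"]
--                     count = 1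
--             except KeyError:
--                 ...
--
--             try:
--                 if source["facts"]["system_purpose_role"]:
--                     stage_lst = source["facts"]["system_purpose_role"]
--                     count = 1
--             except KeyError:
--                 ...
--
--         if count == 0:
--             stage_lst = "No_system_purpose_role_key_available"
--
--     return stage_lst
-- ===== SOURCE B (Python) =====
-- def check_for_system_purpose_role(entries):
--     facts = entries["server"]["facts"]
--     if not facts:
--         return "No_facts_key_available"
--     for source in reversed(facts):
--         f = source.get("facts", {})
--         v = f.get("system_purpose_role") or f.get("SYSPURPOSE_ROLE")
--         if v:
--             return v
--     return "No_system_purpose_role_key_available"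
-- ===== Notes on version B (the rewrite author's own statement) =====
-- stated objective: simpler
-- what changed: Replaces A's forward scan that keeps overwriting stage_lst and a count flag with a reverse scan that returns early at the first source whose facts yield a truthy system_purpose_role (preferred) or SYSPURPOSE_ROLE, maintaining no state across iterations.
import Mathlib
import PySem

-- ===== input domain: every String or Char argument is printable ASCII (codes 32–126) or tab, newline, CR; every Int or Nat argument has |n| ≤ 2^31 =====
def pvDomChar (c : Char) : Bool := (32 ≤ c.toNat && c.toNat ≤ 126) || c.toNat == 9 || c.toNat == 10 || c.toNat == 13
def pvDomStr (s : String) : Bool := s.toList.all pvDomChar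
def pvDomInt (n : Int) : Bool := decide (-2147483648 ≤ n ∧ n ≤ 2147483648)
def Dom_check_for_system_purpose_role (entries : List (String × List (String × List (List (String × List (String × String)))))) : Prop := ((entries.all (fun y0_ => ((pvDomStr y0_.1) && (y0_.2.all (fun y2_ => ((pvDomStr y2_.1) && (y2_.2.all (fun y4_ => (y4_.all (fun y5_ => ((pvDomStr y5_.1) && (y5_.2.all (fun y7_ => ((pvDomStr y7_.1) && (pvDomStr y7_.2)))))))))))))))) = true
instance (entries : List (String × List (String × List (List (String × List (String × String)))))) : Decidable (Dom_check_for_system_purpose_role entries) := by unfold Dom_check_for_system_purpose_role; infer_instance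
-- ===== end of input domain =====

-- B replaces A's forward overwrite-and-count loop by a reverse scan that returns the
-- first within-source preferred truthy value (objective: simpler, with early exit).

-- ===== PORT A =====
-- one body step of A's for-loop: try SYSPURPOSE_ROLE, then system_purpose_role,
-- each overwriting (stage_lst, count) when present and truthy (nonempty string)
def pvStepA (acc : String × Int) (source : List (String × List (String × String))) : String × Int :=
  let acc1 :=
    match (PySem.Dict.mk source).get? "facts" with
    | none => acc
    | some f =>
      match (PySem.Dict.mk f).get? "SYSPURPOSE_ROLE" with
      | none => acc
      | some v => if v ≠ "" then (v, 1) else acc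
  match (PySem.Dict.mk source).get? "facts" with
  | none => acc1
  | some f =>
    match (PySem.Dict.mk f).get? "system_purpose_role" with
    | none => acc1
    | some v => if v ≠ "" then (v, 1) else acc1

def check_for_system_purpose_role (entries : List (String × List (String × List (List (String × List (String × String)))))) : String :=
  match (PySem.Dict.mk entries).get? "server" with
  | none => ""  -- KeyError: excluded by Pre_
  | some server =>
    match (PySem.Dict.mk server).get? "facts" with
    | none => ""  -- KeyError: excluded by Pre_
    | some facts =>
      if facts.length == 0 then "No_facts_key_available"
      else  -- elif len(...) > 0 : exhaustive complement of the if
        let r := facts.foldl pvStepA ("", 0)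
        if r.2 == 0 then "No_system_purpose_role_key_available" else r.1

-- ===== PORT B =====
-- reverse scan, first source (from the end) yielding a truthy value wins;
-- None from dict.get is represented as "" (same truthiness for string values)
def pvScanB : List (List (String × List (String × String))) → String
  | [] => "No_system_purpose_role_key_available"
  | source :: rest =>
    let f := (PySem.Dict.mk source).getD "facts" []
    let v1 := ((PySem.Dict.mk f).get? "system_purpose_role").getD ""
    let v := if v1 ≠ "" then v1 else ((PySem.Dict.mk f).get? "SYSPURPOSE_ROLE").getD ""
    if v ≠ "" then v else pvScanB rest

def check_for_system_purpose_role_alt (entries : List (String × List (String × List (List (String × List (String × String)))))) : String :=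
  match (PySem.Dict.mk entries).get? "server" with
  | none => ""  -- KeyError: excluded by Pre_
  | some server =>
    match (PySem.Dict.mk server).get? "facts" with
    | none => ""  -- KeyError: excluded by Pre_
    | some facts =>
      if facts = [] then "No_facts_key_available"
      else pvScanB facts.reverse

-- ===== PRECONDITION & SPEC =====
-- Pre_ excludes exactly the inputs where entries["server"]["facts"] raises KeyError
-- (missing "server" key, or missing "facts" key inside it); A raises there.
def Pre_check_for_system_purpose_role (entries : List (String × List (String × List (List (String × List (String × String)))))) : Prop :=
  (((PySem.Dict.mk entries).get? "server").bind
    (fun server => (PySem.Dict.mk server).get? "facts")).isSome = true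
instance (entries : List (String × List (String × List (List (String × List (String × String)))))) : Decidable (Pre_check_for_system_purpose_role entries) := by unfold Pre_check_for_system_purpose_role; infer_instance

def pvWitness_check_for_system_purpose_role : (List (String × List (String × List (List (String × List (String × String)))))) :=
  [("server", [("facts", [[("facts", [("system_purpose_role", "role1")])]])])]

def Spec_check_for_system_purpose_role (entries : List (String × List (String × List (List (String × List (String × String)))))) (out : String) : Prop := out = check_for_system_purpose_role_alt entries
instance (entries : List (String × List (String × List (List (String × List (String × String)))))) (out : String) : Decidable (Spec_check_for_system_purpose_role entries out) := by unfold Spec_check_for_system_purpose_role; infer_instance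

-- ===== CLAIM (what is proved, stated in full; the proofs are below) =====
def Claim_equal_check_for_system_purpose_role : Prop := ∀ (entries : List (String × List (String × List (List (String × List (String × String)))))), Dom_check_for_system_purpose_role entries → Pre_check_for_system_purpose_role entries → Spec_check_for_system_purpose_role entries (check_for_system_purpose_role entries)

-- ===== LEMMAS AND PROOFS =====

-- the within-source preferred truthy value (system_purpose_role beats SYSPURPOSE_ROLE)
def pvPick (source : List (String × List (String × String))) : Option String :=
  match (PySem.Dict.mk source).get? "facts" with
  | none => none
  | some f =>
    match (PySem.Dict.mk f).get? "system_purpose_role" with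
    | some v =>
      if v ≠ "" then some v
      else match (PySem.Dict.mk f).get? "SYSPURPOSE_ROLE" with
           | some w => if w ≠ "" then some w else none
           | none => none
    | none =>
      match (PySem.Dict.mk f).get? "SYSPURPOSE_ROLE" with
      | some w => if w ≠ "" then some w else none
      | none => none

theorem pvStepA_pick (acc : String × Int) (s : List (String × List (String × String))) :
    pvStepA acc s = match pvPick s with | some v => (v, 1) | none => acc := by
  unfold pvStepA pvPick
  cases h : (PySem.Dict.mk s).get? "facts" with
  | none => simp
  | some f =>
    simp only
    cases h1 : (PySem.Dict.mk f).get? "system_purpose_role" <;>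
      cases h2 : (PySem.Dict.mk f).get? "SYSPURPOSE_ROLE" <;>
        simp only [] <;> split_ifs <;> simp_all

theorem pvScanB_cons (s : List (String × List (String × String)))
    (rest : List (List (String × List (String × String)))) :
    pvScanB (s :: rest) =
      (let f := (PySem.Dict.mk s).getD "facts" []
       let v1 := ((PySem.Dict.mk f).get? "system_purpose_role").getD ""
       let v := if v1 ≠ "" then v1 else ((PySem.Dict.mk f).get? "SYSPURPOSE_ROLE").getD ""
       if v ≠ "" then v else pvScanB rest) := rfl

theorem pvScanB_pick (s : List (String × List (String × String)))
    (rest : List (List (String × List (String × String)))) :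
    pvScanB (s :: rest) = match pvPick s with | some v => v | none => pvScanB rest := by
  rw [pvScanB_cons]
  unfold pvPick
  cases h : (PySem.Dict.mk s).get? "facts" with
  | none =>
    simp only [PySem.Dict.get?] at h
    simp [PySem.Dict.getD, PySem.Dict.get?, h]
  | some f =>
    simp only [PySem.Dict.getD, h, Option.getD_some]
    cases h1 : (PySem.Dict.mk f).get? "system_purpose_role" <;>
      cases h2 : (PySem.Dict.mk f).get? "SYSPURPOSE_ROLE" <;>
        simp only [Option.getD_some, Option.getD_none] <;> split_ifs <;> simp_all

-- first hit of the reverse scan as an Option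
def pvFirst : List (List (String × List (String × String))) → Option String
  | [] => none
  | s :: rest => match pvPick s with | some v => some v | none => pvFirst rest

theorem pvFirst_cons (s : List (String × List (String × String)))
    (rest : List (List (String × List (String × String)))) :
    pvFirst (s :: rest) = match pvPick s with | some v => some v | none => pvFirst rest := rfl

theorem pvScanB_eq_first (l : List (List (String × List (String × String)))) :
    pvScanB l = match pvFirst l with
                | some v => v
                | none => "No_system_purpose_role_key_available" := by
  induction l with
  | nil => rfl
  | cons s rest ih =>
    rw [pvScanB_pick, pvFirst_cons]
    cases pvPick s <;> simp [ih]

theorem pvFirst_append (xs ys : List (List (String × List (String × String)))) :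
    pvFirst (xs ++ ys) = match pvFirst xs with | some v => some v | none => pvFirst ys := by
  induction xs with
  | nil => rfl
  | cons s rest ih =>
    rw [List.cons_append, pvFirst_cons, pvFirst_cons, ih]
    cases pvPick s <;> simp

-- the forward fold of A's loop equals "last hit = first hit of the reverse"
theorem pvFold_eq (l : List (List (String × List (String × String)))) (acc : String × Int) :
    l.foldl pvStepA acc = match pvFirst l.reverse with | some v => (v, 1) | none => acc := by
  induction l generalizing acc with
  | nil => rfl
  | cons s rest ih =>
    simp only [List.foldl_cons, List.reverse_cons, ih, pvFirst_append]
    cases h : pvFirst rest.reverse with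
    | some v => simp
    | none => simp [pvFirst, pvStepA_pick]; cases pvPick s <;> simp

-- ===== VERDICT (by name: the statement is the Claim_ definition above) =====
theorem check_for_system_purpose_role_spec : Claim_equal_check_for_system_purpose_role := by
  intro entries _ hpre
  unfold Spec_check_for_system_purpose_role
  unfold check_for_system_purpose_role check_for_system_purpose_role_alt
  unfold Pre_check_for_system_purpose_role at hpre
  cases hs : (PySem.Dict.mk entries).get? "server" with
  | none => simp [hs] at hpre
  | some server =>
    cases hf : (PySem.Dict.mk server).get? "facts" with
    | none => simp [hs, hf] at hpre
    | some facts =>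
      simp only [hf]
      cases facts with
      | nil => simp
      | cons s rest =>
        have h1 : ((s :: rest).length == 0) = false := by simp
        have h2 : ¬ (s :: rest) = ([] : List (List (String × List (String × String)))) := by simp
        simp only [h1, Bool.false_eq_true, if_false, if_neg h2]
        rw [pvFold_eq, pvScanB_eq_first]
        cases pvFirst ((s :: rest).reverse) <;> simp
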